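-- pv_equiv track=rewrite | github.com/ParsaYadollahi/COMP-321 | Assignment1/trik.py | trik
-- ===== SOURCE A (Python) =====
-- def trik(pattern):
--     """
--     :type pattern: str
--     :rtype: int
--     """
--
--     position = 1
--     for char in pattern:
--         # a evoked
--         if char.lower() == 'a':
--             if position == 1:
--                 position = 2
--             elif position == 2:
--                 position = 1
--         # b evoked
--         elif char.lower() == 'b':
--             if position == 2:
--                 position = 3
--             elif position == 3:
--                 position = 2
--         # c evoked
--         else:
--             if position == 1:
--                 position = 3
--             elif position == 3:
--                 position = 1
--
--
--     return position
-- ===== SOURCE B (Python) =====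
-- def trik(pattern):
--     # Maintain the whole arrangement: arr[i] is the ball currently at position i+1.
--     arr = [1, 2, 3]
--     pairs = {'a': (0, 1), 'b': (1, 2)}
--     for char in pattern:
--         i, j = pairs.get(char.lower(), (0, 2))
--         arr[i], arr[j] = arr[j], arr[i]
--     return arr.index(1) + 1
-- ===== Notes on version B (the rewrite author's own statement) =====
-- stated objective: alternative
-- what changed: B tracks the full 3-ball arrangement and unconditionally swaps a char-indexed pair of slots each step (no per-position branching), then finds ball 1 at the end, instead of A's scalar position updated by a nested if/elif chain.
import Mathlib
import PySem

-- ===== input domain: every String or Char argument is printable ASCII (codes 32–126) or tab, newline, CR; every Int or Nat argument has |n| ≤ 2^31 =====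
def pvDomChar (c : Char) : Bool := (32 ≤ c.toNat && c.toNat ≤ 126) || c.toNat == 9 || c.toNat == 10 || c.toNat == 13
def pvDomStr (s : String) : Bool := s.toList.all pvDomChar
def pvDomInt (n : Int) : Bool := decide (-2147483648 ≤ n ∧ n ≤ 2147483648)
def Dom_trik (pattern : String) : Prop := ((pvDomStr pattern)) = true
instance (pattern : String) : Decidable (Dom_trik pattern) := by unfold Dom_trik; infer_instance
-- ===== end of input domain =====

-- B maintains the whole arrangement and swaps slot pairs, then locates ball 1; A tracks a scalar position. Objective: alternative decomposition.

-- ===== PORT A =====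
-- one step of A's loop: char.lower() compared against 'a'/'b', nested position branching
def trikStepA (position : Int) (char : Char) : Int :=
  if PySem.Chars.lowerChar char = 'a' then
    if position = 1 then 2 else if position = 2 then 1 else position
  else if PySem.Chars.lowerChar char = 'b' then
    if position = 2 then 3 else if position = 3 then 2 else position
  else
    if position = 1 then 3 else if position = 3 then 1 else position

def trik (pattern : String) : Int :=
  pattern.toList.foldl trikStepA 1

-- ===== PORT B =====
-- Source B's 3-element list arr is the triple (arr[0], arr[1], arr[2]); the swap of the
-- char-selected slot pair is the corresponding component swap (exact transcription).
def trikStepB (s : Int × Int × Int) (char : Char) : Int × Int × Int :=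
  if PySem.Chars.lowerChar char = 'a' then (s.2.1, s.1, s.2.2)
  else if PySem.Chars.lowerChar char = 'b' then (s.1, s.2.2, s.2.1)
  else (s.2.2, s.2.1, s.1)

-- arr.index(1) + 1: first slot holding ball 1 (first-match search, as list.index)
def trikFind1 (s : Int × Int × Int) : Int :=
  if s.1 = 1 then 1 else if s.2.1 = 1 then 2 else 3

def trik_alt (pattern : String) : Int :=
  trikFind1 (pattern.toList.foldl trikStepB (1, 2, 3))

-- ===== PRECONDITION & SPEC =====
def Spec_trik (pattern : String) (out : Int) : Prop := out = trik_alt pattern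
instance (pattern : String) (out : Int) : Decidable (Spec_trik pattern out) := by unfold Spec_trik; infer_instance

-- ===== CLAIM (what is proved, stated in full; the proofs are below) =====
def Claim_equal_trik : Prop := ∀ (pattern : String), Dom_trik pattern → Spec_trik pattern (trik pattern)

-- ===== LEMMAS AND PROOFS =====

-- invariant: exactly one slot holds ball 1
def trikInv (s : Int × Int × Int) : Prop :=
  (s.1 = 1 ∧ s.2.1 ≠ 1 ∧ s.2.2 ≠ 1) ∨
  (s.1 ≠ 1 ∧ s.2.1 = 1 ∧ s.2.2 ≠ 1) ∨
  (s.1 ≠ 1 ∧ s.2.1 ≠ 1 ∧ s.2.2 = 1)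

theorem trik_step (s : Int × Int × Int) (c : Char) (h : trikInv s) :
    trikInv (trikStepB s c) ∧ trikFind1 (trikStepB s c) = trikStepA (trikFind1 s) c := by
  obtain ⟨x, y, z⟩ := s
  rcases h with ⟨h1, h2, h3⟩ | ⟨h1, h2, h3⟩ | ⟨h1, h2, h3⟩ <;>
    simp only [trikStepA, trikStepB, trikFind1, trikInv] <;>
    split_ifs <;> simp_all

theorem trik_loop (cs : List Char) (s : Int × Int × Int) (h : trikInv s) :
    cs.foldl trikStepA (trikFind1 s) = trikFind1 (cs.foldl trikStepB s) := by
  induction cs generalizing s with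
  | nil => rfl
  | cons c cs ih =>
    obtain ⟨hinv, heq⟩ := trik_step s c h
    simp only [List.foldl_cons, ← heq]
    exact ih _ hinv

-- ===== VERDICT (by name: the statement is the Claim_ definition above) =====
theorem trik_spec : Claim_equal_trik := by
  intro pattern _
  show trik pattern = trik_alt pattern
  have h : trikFind1 (1, 2, 3) = 1 := by decide
  unfold trik trik_alt
  rw [← h]
  exact trik_loop _ _ (Or.inl ⟨rfl, by decide, by decide⟩)
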